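-- pv_equiv track=rewrite | github.com/Mm7/is_lab1 | task1.py | subkey
-- ===== SOURCE A (Python) =====
-- KEY_LEN = 32
--
-- def subkey(k, i):
--     round_key = 0
--
--     for j in range(KEY_LEN):
--         # Compute the jth bit of the round key. The formula is
--         # adjusted to a 0-based range.
--         k_index = (5*(i+1)+(j+1)-1) % KEY_LEN
--         assert k_index >= 0 and k_index < KEY_LEN
--         j_bit = (k >> k_index) & 1
--
--         # Copy the bit to the round key.
--         round_key |= (j_bit << j)
--
--     return round_key
-- ===== SOURCE B (Python) =====
-- KEY_LEN = 32
--
-- def subkey(k, i):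
--     # cyclic right-rotation of the 32-bit key by (5*(i+1)) mod 32
--     shift = (5 * (i + 1)) % KEY_LEN
--     m = k & 0xFFFFFFFF
--     return ((m >> shift) | (m << (KEY_LEN - shift))) & 0xFFFFFFFF
-- ===== Notes on version B (the rewrite author's own statement) =====
-- stated objective: simpler
-- what changed: Replaces the 32-iteration per-bit copy loop with a closed-form 32-bit cyclic right-rotation of k & 0xFFFFFFFF by (5*(i+1)) % 32.
import Mathlib
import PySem

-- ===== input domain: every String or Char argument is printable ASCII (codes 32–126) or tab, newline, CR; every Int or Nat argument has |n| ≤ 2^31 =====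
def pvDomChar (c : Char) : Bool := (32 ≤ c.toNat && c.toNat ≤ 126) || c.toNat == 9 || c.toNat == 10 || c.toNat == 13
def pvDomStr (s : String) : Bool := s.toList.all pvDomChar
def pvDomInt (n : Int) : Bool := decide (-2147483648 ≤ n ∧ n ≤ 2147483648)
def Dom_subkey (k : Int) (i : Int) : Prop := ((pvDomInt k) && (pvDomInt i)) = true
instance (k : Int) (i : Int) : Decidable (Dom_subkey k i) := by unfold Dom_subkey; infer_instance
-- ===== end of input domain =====

-- B replaces A's 32-iteration bit-copy loop by a closed-form 32-bit cyclic right-rotation (objective: simpler).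

-- ===== PORT A =====
-- literal port of the loop; the assert always holds (0 <= x % 32 < 32) and has no effect, so it is omitted
def subkey (k : Int) (i : Int) : Int :=
  (PySem.List.pyRange 0 32 1).foldl (fun round_key j =>
    PySem.Int.bor round_key
      (PySem.Int.band (k >>> (PySem.Int.mod (5*(i+1)+(j+1)-1) 32).toNat) 1 <<< j.toNat)) 0

-- ===== PORT B =====
def subkey_alt (k : Int) (i : Int) : Int :=
  let shift := PySem.Int.mod (5*(i+1)) 32
  let m := PySem.Int.band k 4294967295
  PySem.Int.band (PySem.Int.bor (m >>> shift.toNat) (m <<< (32 - shift.toNat))) 4294967295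

-- ===== PRECONDITION & SPEC =====
def Spec_subkey (k : Int) (i : Int) (out : Int) : Prop := out = subkey_alt k i
instance (k : Int) (i : Int) (out : Int) : Decidable (Spec_subkey k i out) := by unfold Spec_subkey; infer_instance

-- ===== CLAIM (what is proved, stated in full; the proofs are below) =====
def Claim_equal_subkey : Prop := ∀ (k : Int) (i : Int), Dom_subkey k i → Spec_subkey k i (subkey k i)

-- ===== LEMMAS AND PROOFS =====

-- Python's a & 0xFFFFFFFF is a % 2**32 (also for negative a)
theorem pv_band_mask (a : Int) : PySem.Int.band a 4294967295 = a % 4294967296 := by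
  unfold PySem.Int.band
  have hb : (0:Int) ≤ 4294967295 := by norm_num
  have htn : (4294967295:Int).toNat = 4294967295 := rfl
  have hmask : ∀ u : Nat, u &&& 4294967295 = u % 4294967296 := by
    intro u
    have := Nat.and_two_pow_sub_one_eq_mod u 32
    norm_num at this
    exact this
  by_cases h : 0 ≤ a
  · rw [if_pos h, if_pos hb, htn, hmask]
    omega
  · rw [if_neg h, if_pos hb, htn, Nat.land_comm, hmask]
    omega

-- bit t (t < 32) of k is bit t of k % 2**32
theorem pv_bit_low (k : Int) (t : Nat) (ht : t < 32) :
    PySem.Int.band (k >>> t) 1 = (((((k % 4294967296).toNat) >>> t) &&& 1 : Nat) : Int) := by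
  rw [PySem.Int.band_one, PySem.Int.mod_eq_emod_of_pos (by norm_num),
      Int.shiftRight_eq_div_pow, Nat.and_one_is_mod, Nat.shiftRight_eq_div_pow]
  set q := k / 4294967296 with hq
  set r := k % 4294967296 with hr
  have hr0 : 0 ≤ r := Int.emod_nonneg k (by norm_num)
  have hk : k = 4294967296 * q + r := (by omega : k = 4294967296 * (k / 4294967296) + k % 4294967296)
  have hfac : (4294967296:Int) = 2 ^ t * 2 ^ (32 - t) := by
    rw [← pow_add, show t + (32 - t) = 32 from by omega]
    norm_num
  have hk2 : k = r + 2 ^ (32 - t) * q * 2 ^ t := by rw [hk, hfac]; ring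
  have hsplit : (2:Int) ^ (32 - t) * q = 2 * (2 ^ (31 - t) * q) := by
    rw [← mul_assoc, ← pow_succ', show 31 - t + 1 = 32 - t from by omega]
  have hcast : ((2:Int) ^ t) = ((2 ^ t : Nat) : Int) := by push_cast; ring
  rw [hk2, hcast, Int.add_mul_ediv_right _ _ (by positivity), hsplit,
      Int.add_mul_emod_self_left]
  push_cast [Int.toNat_of_nonneg hr0]
  rfl

theorem pv_testBit_one (u : Nat) : (1:Nat).testBit u = decide (u = 0) := by
  cases u with
  | zero => rfl
  | succ v => rw [Nat.testBit_succ]; simp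

theorem pv_foldl_lor_testBit (g : Nat → Nat) (l : List Nat) (acc t : Nat) :
    (List.foldl (fun a j => a ||| g j) acc l).testBit t
      = (acc.testBit t || l.any (fun j => (g j).testBit t)) := by
  induction l generalizing acc with
  | nil => simp
  | cons x xs ih => simp [ih, Bool.or_assoc]

theorem pv_bit_term (n s t j : Nat) :
    ((((n >>> ((s + j) % 32)) &&& 1) <<< j).testBit t
      = (decide (j = t) && n.testBit ((s + t) % 32))) := by
  rw [Nat.testBit_shiftLeft, Nat.testBit_and, Nat.testBit_shiftRight, pv_testBit_one]
  by_cases hj : j = t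
  · subst hj
    rw [Nat.sub_self]
    simp
  · rcases Nat.lt_or_ge t j with hlt | hge
    · rw [decide_eq_false (by omega : ¬ t ≥ j), Bool.false_and,
          decide_eq_false hj, Bool.false_and]
    · rw [decide_eq_false (by omega : ¬ t - j = 0), Bool.and_false, Bool.and_false,
          decide_eq_false hj, Bool.false_and]

-- the 32-step bit-copy fold equals the closed-form rotation, over Nat
theorem pv_nat_main (n s : Nat) (hn : n < 4294967296) (hs : s < 32) :
    (List.range 32).foldl (fun rk j => rk ||| (((n >>> ((s + j) % 32)) &&& 1) <<< j)) 0
      = ((n >>> s) ||| (n <<< (32 - s))) &&& 4294967295 := by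
  apply Nat.eq_of_testBit_eq
  intro t
  rw [pv_foldl_lor_testBit]
  simp only [pv_bit_term, Nat.zero_testBit, Bool.false_or]
  have hany : ((List.range 32).any fun j => decide (j = t) && n.testBit ((s + t) % 32))
      = (decide (t < 32) && n.testBit ((s + t) % 32)) := by
    by_cases ht : t < 32
    · cases hC : n.testBit ((s + t) % 32) with
      | false => simp [List.any_eq_false]
      | true => simp [List.any_eq_true, ht]
    · have : ∀ j, j ∈ List.range 32 → (decide (j = t) && n.testBit ((s + t) % 32)) = false := by
        intro j hj
        rw [List.mem_range] at hj
        rw [decide_eq_false (by omega : ¬ j = t), Bool.false_and]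
      rw [List.any_eq_false.mpr (by intro j hj; rw [this j hj]; simp), decide_eq_false ht, Bool.false_and]
  rw [hany]
  have hmask : (4294967295 : Nat) = 2 ^ 32 - 1 := by norm_num
  simp only [hmask, Nat.testBit_and, Nat.testBit_two_pow_sub_one, Nat.testBit_lor,
    Nat.testBit_shiftRight, Nat.testBit_shiftLeft]
  have hhi : ∀ u : Nat, 32 ≤ u → n.testBit u = false := by
    intro u hu
    exact Nat.testBit_lt_two_pow (lt_of_lt_of_le (by norm_num [hn] : n < 2 ^ 32)
      (Nat.pow_le_pow_right (by norm_num) hu))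
  by_cases htlt : t < 32
  · rw [decide_eq_true htlt, Bool.true_and, Bool.and_true]
    rcases Nat.lt_or_ge (s + t) 32 with hlt | hge
    · rw [Nat.mod_eq_of_lt hlt, decide_eq_false (by omega : ¬ t ≥ 32 - s), Bool.false_and,
          Bool.or_false]
    · rw [show (s + t) % 32 = s + t - 32 from by omega, hhi (s + t) hge,
          decide_eq_true (by omega : t ≥ 32 - s), Bool.true_and, Bool.false_or,
          show t - (32 - s) = s + t - 32 from by omega]
  · rw [decide_eq_false htlt, Bool.false_and, Bool.and_false]

-- A's fold, rewritten as the cast of a Nat fold over List.range 32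
theorem pv_A_fold (k i : Int) (n s : Nat) (hn : (n:Int) = k % 4294967296)
    (hs : (s:Int) = PySem.Int.mod (5*(i+1)) 32) :
    ∀ (l : List Nat) (acc : Nat),
      List.foldl (fun round_key j =>
        PySem.Int.bor round_key
          (PySem.Int.band (k >>> (PySem.Int.mod (5*(i+1)+(((j:Nat):Int)+1)-1) 32).toNat) 1 <<< (((j:Nat):Int)).toNat))
        (acc : Int) l
      = ((List.foldl (fun rk j => rk ||| (((n >>> ((s + j) % 32)) &&& 1) <<< j)) acc l : Nat) : Int) := by
  have hs0 : ((s:Int)) = (5*(i+1)) % 32 := by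
    rw [hs, PySem.Int.mod_eq_emod_of_pos (by norm_num : (0:Int) < 32)]
  intro l
  induction l with
  | nil => intro acc; simp
  | cons x xs ih =>
    intro acc
    simp only [List.foldl_cons]
    have hidx : (PySem.Int.mod (5*(i+1)+(((x:Nat):Int)+1)-1) 32) = (((s + x) % 32 : Nat) : Int) := by
      rw [PySem.Int.mod_eq_emod_of_pos (by norm_num : (0:Int) < 32)]
      rw [show 5*(i+1)+(((x:Nat):Int)+1)-1 = 5*(i+1) + ((x:Nat):Int) from by ring]
      conv_lhs => rw [Int.add_emod]
      rw [← hs0]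
      push_cast
      omega
    rw [hidx]
    rw [show ((((s + x) % 32 : Nat) : Int)).toNat = (s + x) % 32 from by omega]
    rw [pv_bit_low k ((s + x) % 32) (Nat.mod_lt _ (by norm_num)), Int.toNat_natCast]
    rw [show (k % 4294967296).toNat = n from by omega]
    rw [show ((((n >>> ((s + x) % 32)) &&& 1 : Nat) : Int) <<< x) = (((((n >>> ((s + x) % 32)) &&& 1) <<< x : Nat)) : Int) from by
      rw [Int.shiftLeft_eq, Nat.shiftLeft_eq]; push_cast; ring]
    rw [PySem.Int.bor_natCast]
    exact ih _

theorem pv_A_char (k i : Int) :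
    subkey k i = (((List.range 32).foldl
      (fun rk j => rk ||| ((((k % 4294967296).toNat >>> (((PySem.Int.mod (5*(i+1)) 32).toNat + j) % 32)) &&& 1) <<< j)) 0 : Nat) : Int) := by
  unfold subkey
  rw [PySem.List.pyRange_one]
  rw [show ((32:Int) - 0).toNat = 32 from rfl]
  rw [List.foldl_map]
  simp only [zero_add]
  have hn : (((k % 4294967296).toNat : Nat) : Int) = k % 4294967296 := by omega
  have hs : (((PySem.Int.mod (5*(i+1)) 32).toNat : Nat) : Int) = PySem.Int.mod (5*(i+1)) 32 := by
    have h2 := PySem.Int.mod_nonneg (5*(i+1)) (by norm_num : (0:Int) < 32)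
    omega
  exact pv_A_fold k i _ _ hn hs (List.range 32) 0

-- B, rewritten as the cast of the Nat rotation
theorem pv_B_char (k i : Int) :
    subkey_alt k i = (((((k % 4294967296).toNat >>> (PySem.Int.mod (5*(i+1)) 32).toNat)
      ||| ((k % 4294967296).toNat <<< (32 - (PySem.Int.mod (5*(i+1)) 32).toNat))) &&& 4294967295 : Nat) : Int) := by
  unfold subkey_alt
  simp only
  set s := (PySem.Int.mod (5*(i+1)) 32).toNat with hsdef
  set n := (k % 4294967296).toNat with hn
  have hm : PySem.Int.band k 4294967295 = ((n:Nat) : Int) := by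
    rw [pv_band_mask]; omega
  rw [hm]
  have hshr : (((n:Nat) : Int) >>> s) = (((n >>> s : Nat)) : Int) := by
    rw [Int.shiftRight_eq_div_pow, Nat.shiftRight_eq_div_pow]
    push_cast
    rfl
  have hshl : (((n:Nat) : Int) <<< (32 - s)) = (((n <<< (32 - s) : Nat)) : Int) := by
    rw [Int.shiftLeft_eq, Nat.shiftLeft_eq]
    push_cast
    ring
  rw [hshr, hshl, PySem.Int.bor_natCast]
  have hmask : (4294967295 : Int) = ((4294967295 : Nat) : Int) := by norm_num
  rw [hmask, PySem.Int.band_natCast]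

-- ===== VERDICT (by name: the statement is the Claim_ definition above) =====
theorem subkey_spec : Claim_equal_subkey := by
  intro k i _
  unfold Spec_subkey
  rw [pv_A_char, pv_B_char]
  congr 1
  exact pv_nat_main _ _ (by omega) ((PySem.Int.mod (5*(i+1)) 32).toNat.lt_of_lt_of_le
    (by have h1 := PySem.Int.mod_lt (5*(i+1)) (b := 32) (by norm_num)
        have h2 := PySem.Int.mod_nonneg (5*(i+1)) (b := 32) (by norm_num)
        omega) (le_refl 32))
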